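-- pv_equiv track=rewrite | github.com/icedmuffin/python-playground | scratching/test.py | divide_task
-- ===== SOURCE A (Python) =====
-- def divide_task(rows, threads):
--     chunk_size = rows // threads
--     remainder = rows % threads
--
--     ranges = []
--     start = 0
--
--     for i in range(threads):
--         if start >= rows :
--             ranges.append(None)
--         else:
--             end = start + chunk_size + (1 if i < remainder else 0)
--             ranges.append((start, end))
--             start = end
--
--     return ranges
-- ===== SOURCE B (Python) =====
-- def divide_task(rows, threads):
--     q, r = divmod(rows, threads)
--
--     def rng(i):
--         s = i * q + min(i, r)
--         if s >= rows:
--             return None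
--         return (s, (i + 1) * q + min(i + 1, r))
--
--     return [rng(i) for i in range(threads)]
-- ===== Notes on version B (the rewrite author's own statement) =====
-- stated objective: alternative
-- what changed: B computes each thread's (start,end) range independently from a closed form (start_i = i*q + min(i,r)) via a list comprehension, eliminating A's sequentially threaded running-start accumulator.
import Mathlib
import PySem

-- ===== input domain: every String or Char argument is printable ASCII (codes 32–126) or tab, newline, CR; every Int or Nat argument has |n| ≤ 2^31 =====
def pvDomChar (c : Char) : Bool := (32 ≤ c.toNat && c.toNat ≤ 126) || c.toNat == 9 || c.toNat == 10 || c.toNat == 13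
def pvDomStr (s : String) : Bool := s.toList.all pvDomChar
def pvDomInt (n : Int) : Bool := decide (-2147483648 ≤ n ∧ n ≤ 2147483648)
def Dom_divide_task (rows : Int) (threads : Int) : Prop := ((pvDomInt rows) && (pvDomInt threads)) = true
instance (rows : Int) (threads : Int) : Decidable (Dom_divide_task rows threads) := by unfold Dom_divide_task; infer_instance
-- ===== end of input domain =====

-- B replaces A's running-start accumulator by an independent closed-form range per index (alternative decomposition, same cost).

-- ===== PORT A =====
def divide_task (rows : Int) (threads : Int) : List (Option (Int × Int)) :=
  let chunk_size := PySem.Int.floordiv rows threads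
  let remainder := PySem.Int.mod rows threads
  let st := (PySem.List.pyRange 0 threads 1).foldl
    (fun (st : List (Option (Int × Int)) × Int) i =>
      if st.2 ≥ rows then (st.1 ++ [none], st.2)
      else
        let e := st.2 + chunk_size + (if i < remainder then 1 else 0)
        (st.1 ++ [some (st.2, e)], e)) ([], 0)
  st.1

-- ===== PORT B =====
def divide_task_alt (rows : Int) (threads : Int) : List (Option (Int × Int)) :=
  let q := PySem.Int.floordiv rows threads
  let r := PySem.Int.mod rows threads
  (PySem.List.pyRange 0 threads 1).map (fun i =>
    let s := i * q + min i r
    if s ≥ rows then none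
    else some (s, (i + 1) * q + min (i + 1) r))

-- ===== PRECONDITION & SPEC =====
-- Pre_ excludes exactly threads = 0, where Python's // and % raise ZeroDivisionError in both A and B.
def Pre_divide_task (rows : Int) (threads : Int) : Prop := threads ≠ 0
instance (rows : Int) (threads : Int) : Decidable (Pre_divide_task rows threads) := by unfold Pre_divide_task; infer_instance
def pvWitness_divide_task : Int × Int := (10, 3)

def Spec_divide_task (rows : Int) (threads : Int) (out : List (Option (Int × Int))) : Prop := out = divide_task_alt rows threads
instance (rows : Int) (threads : Int) (out : List (Option (Int × Int))) : Decidable (Spec_divide_task rows threads out) := by unfold Spec_divide_task; infer_instance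

-- ===== CLAIM (what is proved, stated in full; the proofs are below) =====
def Claim_equal_divide_task : Prop := ∀ (rows : Int) (threads : Int), Dom_divide_task rows threads → Pre_divide_task rows threads → Spec_divide_task rows threads (divide_task rows threads)

-- ===== LEMMAS AND PROOFS =====

-- A's loop, abstracted over the remaining index list, the accumulated output and the running start.
def pvAloop (rows chunk rem : Int) (l : List Int) (acc : List (Option (Int × Int))) (s : Int) :
    List (Option (Int × Int)) × Int :=
  l.foldl
    (fun (st : List (Option (Int × Int)) × Int) i =>
      if st.2 ≥ rows then (st.1 ++ [none], st.2)
      else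
        let e := st.2 + chunk + (if i < rem then 1 else 0)
        (st.1 ++ [some (st.2, e)], e)) (acc, s)

theorem pvAloop_nil (rows chunk rem : Int) (acc : List (Option (Int × Int))) (s : Int) :
    pvAloop rows chunk rem [] acc s = (acc, s) := rfl

theorem pvAloop_cons (rows chunk rem i : Int) (l : List Int) (acc : List (Option (Int × Int))) (s : Int) :
    pvAloop rows chunk rem (i :: l) acc s =
      if s ≥ rows then pvAloop rows chunk rem l (acc ++ [none]) s
      else pvAloop rows chunk rem l (acc ++ [some (s, s + chunk + (if i < rem then 1 else 0))])
             (s + chunk + (if i < rem then 1 else 0)) := by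
  simp only [pvAloop, List.foldl]
  split_ifs <;> rfl

theorem divide_task_eq_pvAloop (rows threads : Int) :
    divide_task rows threads =
      (pvAloop rows (PySem.Int.floordiv rows threads) (PySem.Int.mod rows threads)
        (PySem.List.pyRange 0 threads 1) [] 0).1 := rfl

-- once start ≥ rows, A emits none for the rest of the loop and never moves start
theorem pvAloop_none (rows chunk rem : Int) (l : List Int) (acc : List (Option (Int × Int))) (s : Int)
    (hs : s ≥ rows) :
    (pvAloop rows chunk rem l acc s).1 = acc ++ l.map (fun _ => none) := by
  induction l generalizing acc with
  | nil => simp [pvAloop_nil]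
  | cons i l ih => rw [pvAloop_cons, if_pos hs, ih]; simp

-- rows ≥ 0: A's running start coincides with the closed form i*q + min i r at every index
theorem pvAloop_clos (rows threads q r : Int) (hq : q * threads + r = rows) (hq0 : 0 ≤ q) :
    ∀ (n : ℕ) (a : Int) (acc : List (Option (Int × Int))), 0 ≤ a → a + n = threads →
      (pvAloop rows q r (PySem.List.pyRange a threads 1) acc (a * q + min a r)).1 =
        acc ++ (PySem.List.pyRange a threads 1).map (fun i =>
          if i * q + min i r ≥ rows then none
          else some (i * q + min i r, (i + 1) * q + min (i + 1) r)) := by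
  have clos_le : ∀ i : Int, 0 ≤ i → i ≤ threads → i * q + min i r ≤ rows := by
    intro i hi0 hit
    rcases le_total i r with h | h
    · rw [min_eq_left h]
      nlinarith [mul_nonneg hq0 (by omega : (0:Int) ≤ threads - i)]
    · rw [min_eq_right h]
      nlinarith [mul_le_mul_of_nonneg_left hit hq0]
  intro n
  induction n with
  | zero =>
    intro a acc _ hn
    rw [PySem.List.pyRange_one_eq_nil (by omega)]
    simp [pvAloop_nil]
  | succ n ih =>
    intro a acc ha0 hn
    have hat : a < threads := by omega
    rw [PySem.List.pyRange_one_cons hat, pvAloop_cons]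
    have hsucc : (a + 1) * q = a * q + q := by ring
    have hstep : (a + 1) * q + min (a + 1) r = a * q + min a r + q + (if a < r then 1 else 0) := by
      split_ifs with h <;> omega
    by_cases hge : a * q + min a r ≥ rows
    · rw [if_pos hge]
      have heq : a * q + min a r = rows := le_antisymm (clos_le a ha0 (le_of_lt hat)) hge
      have heq1 : (a + 1) * q + min (a + 1) r = rows := by
        have h1 := clos_le (a + 1) (by omega) (by omega)
        omega
      rw [heq]
      have h2 := ih (a + 1) (acc ++ [none]) (by omega) (by omega)
      rw [heq1] at h2
      rw [h2]
      simp [hge]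
    · rw [if_neg hge]
      rw [← hstep]
      have h2 := ih (a + 1) (acc ++ [some (a * q + min a r, (a + 1) * q + min (a + 1) r)]) (by omega) (by omega)
      rw [h2]
      simp [hge]

theorem divide_task_spec : Claim_equal_divide_task := by
  intro rows threads _ hpre
  unfold Spec_divide_task
  unfold Pre_divide_task at hpre
  rcases lt_trichotomy threads 0 with hneg | hzero | hpos
  · -- threads < 0: range is empty, both return []
    rw [divide_task_eq_pvAloop, PySem.List.pyRange_one_eq_nil (by omega)]
    simp [divide_task_alt, PySem.List.pyRange_one_eq_nil (by omega : threads ≤ (0:Int))]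
    rfl
  · exact absurd hzero hpre
  · set q := PySem.Int.floordiv rows threads with hqdef
    set r := PySem.Int.mod rows threads with hrdef
    have hq : q * threads + r = rows := PySem.Int.floordiv_mul_add_mod rows threads
    have hre : r = rows % threads := by rw [hrdef, PySem.Int.mod_eq_emod_of_pos hpos]
    have hr0 : 0 ≤ r := by rw [hre]; exact Int.emod_nonneg rows (by omega)
    have hr1 : r < threads := by rw [hre]; exact Int.emod_lt_of_pos rows hpos
    by_cases hrows : 0 ≤ rows
    · -- rows ≥ 0: the running start equals the closed form throughout
      have hq0 : 0 ≤ q := by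
        by_contra h
        nlinarith [mul_le_mul_of_nonneg_right (by omega : q ≤ -1) (le_of_lt hpos)]
      have h := pvAloop_clos rows threads q r hq hq0 threads.toNat 0 []
        le_rfl (by omega)
      rw [divide_task_eq_pvAloop, ← hqdef, ← hrdef]
      simpa [divide_task_alt, ← hqdef, ← hrdef, min_eq_left hr0] using h
    · -- rows < 0: A keeps start = 0 ≥ rows (all none); B's closed start is ≥ rows everywhere too
      have hq0 : q ≤ -1 := by
        by_contra h
        nlinarith [mul_nonneg (by omega : (0:Int) ≤ q) (le_of_lt hpos)]
      rw [divide_task_eq_pvAloop, ← hqdef, ← hrdef,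
        pvAloop_none rows q r _ [] 0 (by omega)]
      simp only [divide_task_alt, ← hqdef, ← hrdef, List.nil_append]
      apply Eq.symm
      apply List.map_congr_left
      intro i hi
      have hmem := (PySem.List.mem_pyRange_one).1 hi
      have hge : i * q + min i r ≥ rows := by
        have hm : (threads - i) * q ≤ (threads - i) * (-1) :=
          mul_le_mul_of_nonneg_left hq0 (by omega)
        rcases le_total i r with h | h
        · rw [min_eq_left h]; nlinarith
        · rw [min_eq_right h]; nlinarith
      simp [hge]
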